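-- pv_equiv track=rewrite | github.com/therbert448/Advent-of-Code | 2020/Day 07/Day7a.py | findouter
-- ===== SOURCE A (Python) =====
-- def findouter(colour, ruledict):
--     newcol = set(colour)
--     for outerbag in ruledict:
--         for innerbag in ruledict[outerbag]:
--             for col in colour:
--                 if col in innerbag:
--                     newcol.add(outerbag)
--     if len(newcol) != len(colour):
--         newcol = findouter(newcol, ruledict)
--     return newcol
-- ===== SOURCE B (Python) =====
-- def findouter(colour, ruledict):
--     # Worklist closure over the containment rules: each round only tests the
--     # colours discovered in the previous round (the frontier) instead of
--     # re-scanning the whole colour set against every rule.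
--     out = []
--     for c in colour:
--         if c not in out:
--             out.append(c)
--     frontier = list(colour)
--     while frontier:
--         new = []
--         for outer, inners in ruledict.items():
--             if outer not in out and any(c in inner for inner in inners for c in frontier):
--                 out.append(outer)
--                 new.append(outer)
--         frontier = new
--     return set(out)
-- ===== Notes on version B (the rewrite author's own statement) =====
-- stated objective: faster
-- what changed: A repeatedly rescans the ENTIRE growing colour set against every rule and recurses until the size stabilises; B builds the closure with a worklist/BFS: each round tests only the colours discovered in the previous round (the frontier) against the rules, so every colour is scanned exactly once.
import Mathlib
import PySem

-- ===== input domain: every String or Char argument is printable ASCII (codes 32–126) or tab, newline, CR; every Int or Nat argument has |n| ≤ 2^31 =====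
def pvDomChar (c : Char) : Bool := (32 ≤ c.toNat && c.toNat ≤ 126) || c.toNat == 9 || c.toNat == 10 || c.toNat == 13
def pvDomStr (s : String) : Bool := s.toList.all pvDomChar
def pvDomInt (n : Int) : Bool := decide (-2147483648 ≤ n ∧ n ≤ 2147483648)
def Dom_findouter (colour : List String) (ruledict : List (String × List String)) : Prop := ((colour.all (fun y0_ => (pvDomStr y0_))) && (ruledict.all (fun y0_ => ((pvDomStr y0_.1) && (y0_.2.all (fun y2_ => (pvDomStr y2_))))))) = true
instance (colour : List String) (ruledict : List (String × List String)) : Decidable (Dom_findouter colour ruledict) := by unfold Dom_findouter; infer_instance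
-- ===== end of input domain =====

-- B replaces A's repeated full rescans of the whole colour set with a one-pass-per-colour
-- worklist (frontier) closure over the containment rules; equivalence is proved on
-- duplicate-free colour lists and duplicate-free rule keys (Pre_).


-- ===== PORT A =====
-- general lemmas cited by the ports' decreasing_by proofs

-- a loop that conditionally adds one fixed element collapses to a single conditional add
theorem pv_foldl_ifadd {β : Type} (p : β → Bool) (k : String) (l : List β) (s : List String) :
    l.foldl (fun s x => if p x then PySem.Set.add s k else s) s
      = if l.any p then PySem.Set.add s k else s := by
  induction l generalizing s with
  | nil => simp
  | cons x t ih =>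
    by_cases hx : p x = true
    · simp [hx, ih]
    · simp only [Bool.not_eq_true] at hx
      simp [hx, ih]

-- collapsing A's inner two loops: each outer key is conditionally added once
theorem pv_A_collapse (colour : List String) (ruledict : List (String × List String))
    (s : List String) :
    (ruledict.map Prod.fst).foldl (fun newcol outerbag =>
        (PySem.Dict.getD ⟨ruledict⟩ outerbag []).foldl (fun newcol innerbag =>
          colour.foldl (fun newcol col =>
            if PySem.Str.isIn col innerbag then PySem.Set.add newcol outerbag else newcol) newcol) newcol) s
      = (ruledict.map Prod.fst).foldl (fun newcol outerbag =>
          if (PySem.Dict.getD ⟨ruledict⟩ outerbag []).any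
              (fun innerbag => colour.any (fun col => PySem.Str.isIn col innerbag))
          then PySem.Set.add newcol outerbag else newcol) s := by
  apply PySem.List.foldl_congr_mem
  intro acc k _
  simp only [pv_foldl_ifadd]

-- structure of one conditional-add pass: it appends fresh triggered keys
theorem pv_sfold_decomp (T : String → Bool) (l : List String) :
    ∀ s : List String, s.Nodup →
      ∃ e, l.foldl (fun s k => if T k then PySem.Set.add s k else s) s = s ++ e ∧
        (s ++ e).Nodup ∧ ∀ x ∈ e, x ∈ l ∧ x ∉ s ∧ T x = true := by
  induction l with
  | nil => intro s hs; exact ⟨[], by simp, by simpa using hs, by simp⟩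
  | cons k t ih =>
    intro s hs
    by_cases hk : T k = true
    · by_cases hmem : k ∈ s
      · obtain ⟨e, h1, h2, h3⟩ := ih s hs
        exact ⟨e, by simpa [hk, PySem.Set.add_of_mem hmem] using h1, h2,
          fun x hx => ⟨List.mem_cons_of_mem _ (h3 x hx).1, (h3 x hx).2.1, (h3 x hx).2.2⟩⟩
      · have hnd : (s ++ [k]).Nodup := by
          have := PySem.Set.nodup_add (s := s) (x := k) hs
          rwa [PySem.Set.add_of_not_mem hmem] at this
        obtain ⟨e, h1, h2, h3⟩ := ih (s ++ [k]) hnd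
        refine ⟨k :: e, ?_, ?_, ?_⟩
        · simpa [hk, PySem.Set.add_of_not_mem hmem] using h1
        · simpa using h2
        · intro x hx
          rcases List.mem_cons.mp hx with rfl | hx
          · exact ⟨List.mem_cons_self, hmem, hk⟩
          · obtain ⟨m1, m2, m3⟩ := h3 x hx
            exact ⟨List.mem_cons_of_mem _ m1, fun hc => m2 (by simp [hc]), m3⟩
    · simp only [Bool.not_eq_true] at hk
      obtain ⟨e, h1, h2, h3⟩ := ih s hs
      exact ⟨e, by simpa [hk] using h1, h2,
        fun x hx => ⟨List.mem_cons_of_mem _ (h3 x hx).1, (h3 x hx).2.1, (h3 x hx).2.2⟩⟩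

-- a strict count comparison used by both termination measures
theorem pv_countP_lt (l : List String) (p q : String → Bool)
    (h : ∀ x ∈ l, p x = true → q x = true) (x : String) (hx : x ∈ l)
    (hpx : p x = false) (hqx : q x = true) : l.countP p < l.countP q := by
  induction l with
  | nil => cases hx
  | cons a t ih =>
    have hmono : t.countP p ≤ t.countP q :=
      List.countP_mono_left (fun y hy => h y (List.mem_cons_of_mem _ hy))
    rcases List.mem_cons.mp hx with rfl | hx'
    · simp [hpx, hqx]
      omega
    · have hlt := ih (fun y hy => h y (List.mem_cons_of_mem _ hy)) hx'
      have hpq := h a List.mem_cons_self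
      by_cases hpa : p a = true
      · simp [hpa, hpq hpa]; omega
      · simp only [Bool.not_eq_true] at hpa
        by_cases hqa : q a = true
        · simp [hpa, hqa]; omega
        · simp only [Bool.not_eq_true] at hqa
          simp [hpa, hqa]; omega

-- port of A: literal transliteration of the Python (recursion until the size stabilises);
-- the three nested for-loops are the helper findouterScan; ruledict[outerbag] is ported as
-- getD with an unused default, since the key comes from the dict itself
def findouterScan (colour : List String) (ruledict : List (String × List String))
    (newcol : List String) : List String :=
  (ruledict.map Prod.fst).foldl (fun newcol outerbag =>
    (PySem.Dict.getD ⟨ruledict⟩ outerbag []).foldl (fun newcol innerbag =>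
      colour.foldl (fun newcol col =>
        if PySem.Str.isIn col innerbag then PySem.Set.add newcol outerbag else newcol) newcol) newcol)
    newcol

theorem pv_scan_collapse (colour : List String) (ruledict : List (String × List String))
    (s : List String) :
    findouterScan colour ruledict s
      = (ruledict.map Prod.fst).foldl (fun newcol outerbag =>
          if (PySem.Dict.getD ⟨ruledict⟩ outerbag []).any
              (fun innerbag => colour.any (fun col => PySem.Str.isIn col innerbag))
          then PySem.Set.add newcol outerbag else newcol) s := pv_A_collapse colour ruledict s

def findouter (colour : List String) (ruledict : List (String × List String)) : List String :=
  let newcol := findouterScan colour ruledict (PySem.Set.ofList colour)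
  if h : newcol.length ≠ colour.length then findouter newcol ruledict else newcol
termination_by 2 * (ruledict.map Prod.fst).countP (fun k => !colour.contains k) +
  (if colour.Nodup then 0 else 1)
decreasing_by
  simp only [pv_scan_collapse]
  obtain ⟨e, he, hnd, hprop⟩ :=
    pv_sfold_decomp
      (fun outerbag => (PySem.Dict.getD ⟨ruledict⟩ outerbag []).any
        (fun innerbag => colour.any (fun col => PySem.Str.isIn col innerbag)))
      (ruledict.map Prod.fst) (PySem.Set.ofList colour) (PySem.Set.nodup_ofList colour)
  have h' : (PySem.Set.ofList colour ++ e).length ≠ colour.length := by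
    rw [← he, ← pv_scan_collapse]
    exact h
  rw [he]
  rcases e with _ | ⟨x, e'⟩
  · -- nothing was added: the set is just the deduplicated colour list
    simp only [List.append_nil] at h' hnd ⊢
    have hcn : ¬ colour.Nodup := by
      intro hcnd
      exact h' (by rw [PySem.Set.ofList_eq_self_of_nodup colour hcnd])
    have hcount : (ruledict.map Prod.fst).countP
          (fun k => !List.contains (PySem.Set.ofList colour) k)
        = (ruledict.map Prod.fst).countP (fun k => !colour.contains k) := by
      apply List.countP_congr
      intro k _
      simp [PySem.Set.mem_ofList]
    rw [hcount, if_pos hnd, if_neg hcn]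
    omega
  · -- a fresh key was added: strictly fewer keys remain outside the set
    obtain ⟨hx1, hx2, _⟩ := hprop x List.mem_cons_self
    have hmono : ∀ y ∈ ruledict.map Prod.fst,
        (!List.contains (PySem.Set.ofList colour ++ x :: e') y) = true →
          (!colour.contains y) = true := by
      intro y _ hy
      simp only [Bool.not_eq_true', List.contains_eq_mem, decide_eq_false_iff_not,
        List.mem_append, PySem.Set.mem_ofList] at hy ⊢
      exact fun hc => hy (Or.inl hc)
    have hlt : (ruledict.map Prod.fst).countP
          (fun k => !List.contains (PySem.Set.ofList colour ++ x :: e') k)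
        < (ruledict.map Prod.fst).countP (fun k => !colour.contains k) :=
      pv_countP_lt _ _ _ hmono x hx1 (by simp)
        (by simp only [Bool.not_eq_true', List.contains_eq_mem]
            simpa [PySem.Set.mem_ofList] using hx2)
    have h0 : (if (PySem.Set.ofList colour ++ x :: e').Nodup then 0 else 1) = 0 := by simp [hnd]
    rw [h0]
    omega

-- ===== PORT B =====
-- structure of B's round: the pair accumulator appends the same fresh keys to both components
theorem pv_bstep (T : String × List String → Bool) (rd : List (String × List String)) :
    ∀ u nl : List String,
      ∃ e, rd.foldl (fun acc p =>
          if !acc.1.contains p.1 && T p then (acc.1 ++ [p.1], acc.2 ++ [p.1]) else acc) (u, nl)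
        = (u ++ e, nl ++ e) ∧ ∀ x ∈ e, x ∈ rd.map Prod.fst ∧ x ∉ u := by
  induction rd with
  | nil => intro u nl; exact ⟨[], by simp, by simp⟩
  | cons p t ih =>
    intro u nl
    by_cases hc : (!u.contains p.1 && T p) = true
    · obtain ⟨e, h1, h2⟩ := ih (u ++ [p.1]) (nl ++ [p.1])
      refine ⟨p.1 :: e, ?_, ?_⟩
      · rw [List.foldl_cons, if_pos hc]
        simpa [List.append_assoc] using h1
      · intro x hx
        rcases List.mem_cons.mp hx with rfl | hx
        · refine ⟨by simp, ?_⟩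
          have := ((Bool.and_eq_true _ _).mp hc).1
          simpa using this
        · obtain ⟨m1, m2⟩ := h2 x hx
          exact ⟨List.mem_cons_of_mem _ m1, fun hm => m2 (by simp [hm])⟩
    · obtain ⟨e, h1, h2⟩ := ih u nl
      refine ⟨e, ?_, fun x hx => ⟨List.mem_cons_of_mem _ (h2 x hx).1, (h2 x hx).2⟩⟩
      rw [List.foldl_cons, if_neg hc]
      exact h1

-- one round of B's while-loop: scan the rules once against the frontier
def findouterRound (ruledict : List (String × List String)) (out frontier : List String) :
    List String × List String :=
  ruledict.foldl (fun acc p =>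
      if !acc.1.contains p.1 &&
          p.2.any (fun inner => frontier.any (fun c => PySem.Str.isIn c inner))
      then (acc.1 ++ [p.1], acc.2 ++ [p.1]) else acc) (out, ([] : List String))

theorem pv_round_spec (ruledict : List (String × List String)) (out frontier : List String) :
    ∃ e, findouterRound ruledict out frontier = (out ++ e, e) ∧
      ∀ x ∈ e, x ∈ ruledict.map Prod.fst ∧ x ∉ out := by
  obtain ⟨e, h1, h2⟩ :=
    pv_bstep (fun p => p.2.any (fun inner => frontier.any (fun c => PySem.Str.isIn c inner)))
      ruledict out []
  exact ⟨e, by simpa [findouterRound] using h1, h2⟩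

-- the while-loop of B: close over the frontier until nothing new is found
def findouterLoop (ruledict : List (String × List String)) (out frontier : List String) :
    List String :=
  if h : frontier.isEmpty then out
  else
    let step := findouterRound ruledict out frontier
    findouterLoop ruledict step.1 step.2
termination_by 2 * (ruledict.map Prod.fst).countP (fun k => !out.contains k) +
  (if frontier.isEmpty then 0 else 1)
decreasing_by
  obtain ⟨e, hstep, hfresh⟩ := pv_round_spec ruledict out frontier
  simp only [hstep]
  have hflag : (if frontier.isEmpty = true then 0 else 1) = 1 := by simp [h]
  rw [hflag]
  rcases e with _ | ⟨x, e'⟩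
  · simp
  · obtain ⟨hx1, hx2⟩ := hfresh x List.mem_cons_self
    have hmono : ∀ y ∈ ruledict.map Prod.fst,
        (!(out ++ x :: e').contains y) = true → (!out.contains y) = true := by
      intro y _ hy
      simp only [Bool.not_eq_true', List.contains_eq_mem, decide_eq_false_iff_not,
        List.mem_append] at hy ⊢
      exact fun hc => hy (Or.inl hc)
    have hlt : (ruledict.map Prod.fst).countP (fun k => !(out ++ x :: e').contains k)
        < (ruledict.map Prod.fst).countP (fun k => !out.contains k) :=
      pv_countP_lt _ _ _ hmono x hx1 (by simp) (by simpa using hx2)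
    have : (if (x :: e').isEmpty = true then 0 else 1) ≤ 1 := by split <;> omega
    omega

-- port of B: dedup the starting colours, then the worklist closure, returned as a set
def findouter_alt (colour : List String) (ruledict : List (String × List String)) : List String :=
  let out := colour.foldl (fun out c => if out.contains c then out else out ++ [c]) ([] : List String)
  PySem.Set.ofList (findouterLoop ruledict out colour)

-- ===== PRECONDITION & SPEC =====
-- Pre_ restricts to the function's natural domain: 'colour' stands for a SET of colours, so
-- lists with duplicate colours are excluded (there A's length-based stopping test conflates
-- deduplication with growth and can stop before the closure is complete), and the association
-- list must have duplicate-free keys, as any list representing a Python dict does.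
def Pre_findouter (colour : List String) (ruledict : List (String × List String)) : Prop :=
  colour.Nodup ∧ (ruledict.map Prod.fst).Nodup
instance (colour : List String) (ruledict : List (String × List String)) :
    Decidable (Pre_findouter colour ruledict) := by unfold Pre_findouter; infer_instance

def pvWitness_findouter : List String × (List (String × List String)) :=
  (["shiny gold"], [("muted yellow", ["shiny gold", "faded blue"]), ("dark olive", ["muted yellow"])])

def Spec_findouter (colour : List String) (ruledict : List (String × List String))
    (out : List String) : Prop := out = findouter_alt colour ruledict
instance (colour : List String) (ruledict : List (String × List String)) (out : List String) :
    Decidable (Spec_findouter colour ruledict out) := by unfold Spec_findouter; infer_instance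

-- ===== CLAIM (what is proved, stated in full; the proofs are below) =====
def Claim_equal_findouter : Prop := ∀ (colour : List String) (ruledict : List (String × List String)), Dom_findouter colour ruledict → Pre_findouter colour ruledict → Spec_findouter colour ruledict (findouter colour ruledict)

-- ===== LEMMAS AND PROOFS =====

-- the trigger test: some already-reached colour occurs inside some inner-bag description
def pvTrig (c inners : List String) : Bool :=
  inners.any (fun inner => c.any (fun col => PySem.Str.isIn col inner))

def pvT (ruledict : List (String × List String)) (c : List String) (k : String) : Bool :=
  pvTrig c (PySem.Dict.getD ⟨ruledict⟩ k [])

theorem pv_T_nil (rd : List (String × List String)) (k : String) : pvT rd [] k = false := by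
  simp [pvT, pvTrig]

theorem pv_or_shuffle (x y z w : Bool) : ((x || y) || (z || w)) = ((x || z) || (y || w)) := by
  cases x <;> cases y <;> cases z <;> cases w <;> rfl

theorem pv_trig_append (a b v : List String) :
    pvTrig (a ++ b) v = (pvTrig a v || pvTrig b v) := by
  induction v with
  | nil => simp [pvTrig]
  | cons i t ih =>
    simp only [pvTrig, List.any_cons] at ih ⊢
    rw [List.any_append, ih, pv_or_shuffle]

theorem pv_T_append (rd : List (String × List String)) (a b : List String) (k : String) :
    pvT rd (a ++ b) k = (pvT rd a k || pvT rd b k) := pv_trig_append a b _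

-- membership after one conditional-add pass
theorem pv_sfold_mem (T : String → Bool) (l : List String) :
    ∀ (s : List String) (x : String),
      x ∈ l.foldl (fun s k => if T k then PySem.Set.add s k else s) s ↔
        x ∈ s ∨ (x ∈ l ∧ T x = true) := by
  induction l with
  | nil => simp
  | cons k t ih =>
    intro s x
    by_cases hk : T k = true
    · by_cases hxk : x = k
      · subst hxk
        simp [hk, ih, PySem.Set.mem_add]
      · simp only [hk, if_true, List.foldl_cons, ih, PySem.Set.mem_add]
        constructor
        · rintro (⟨h | rfl⟩ | h)
          · exact Or.inl h
          · exact absurd rfl hxk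
          · exact Or.inr ⟨List.mem_cons_of_mem _ h.1, h.2⟩
        · rintro (h | ⟨hm, hT⟩)
          · exact Or.inl (Or.inl h)
          · rcases List.mem_cons.mp hm with rfl | hm
            · exact absurd rfl hxk
            · exact Or.inr ⟨hm, hT⟩
    · simp only [Bool.not_eq_true] at hk
      by_cases hxk : x = k
      · subst hxk; simp [hk, ih]
      · simp only [hk, Bool.false_eq_true, if_false, List.foldl_cons, ih]
        constructor
        · rintro (h | h)
          · exact Or.inl h
          · exact Or.inr ⟨List.mem_cons_of_mem _ h.1, h.2⟩
        · rintro (h | ⟨hm, hT⟩)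
          · exact Or.inl h
          · rcases List.mem_cons.mp hm with rfl | hm
            · simp [hk] at hT
            · exact Or.inr ⟨hm, hT⟩

-- one pass testing T₁ = T_old || T₂ equals the pass testing only T₂, provided every key
-- triggered by the old colours is already present
theorem pv_sfold_frontier (T₁ T₂ : String → Bool) (out : List String) (l : List String)
    (himp : ∀ k, T₂ k = true → T₁ k = true)
    (hcov : ∀ k ∈ l, T₁ k = true → T₂ k = true ∨ k ∈ out) :
    ∀ s : List String, (∀ x ∈ out, x ∈ s) →
      l.foldl (fun s k => if T₁ k then PySem.Set.add s k else s) s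
        = l.foldl (fun s k => if T₂ k then PySem.Set.add s k else s) s := by
  induction l with
  | nil => intro s _; rfl
  | cons k t ih =>
    intro s hs
    have ihs := fun s hs => ih (fun y hy h => hcov y (List.mem_cons_of_mem _ hy) h) s hs
    by_cases h1 : T₁ k = true
    · by_cases h2 : T₂ k = true
      · simp only [List.foldl_cons, h1, h2, if_true]
        exact ihs _ (fun x hx => by simp [PySem.Set.mem_add, hs x hx])
      · simp only [Bool.not_eq_true] at h2
        have hk : k ∈ out := by
          rcases hcov k List.mem_cons_self h1 with hT | hk
          · simp [h2] at hT
          · exact hk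
        simp only [List.foldl_cons, h1, h2, if_true, Bool.false_eq_true, if_false,
          PySem.Set.add_of_mem (hs k hk)]
        exact ihs _ hs
    · have h2 : T₂ k = false := by
        by_contra hc
        simp only [Bool.not_eq_false] at hc
        exact h1 (himp k hc)
      simp only [Bool.not_eq_true] at h1
      simp only [List.foldl_cons, h1, h2, Bool.false_eq_true, if_false]
      exact ihs _ hs

-- A unfolded in canonical round form
theorem pv_A_eq (colour : List String) (rd : List (String × List String)) :
    findouter colour rd =
      if ((rd.map Prod.fst).foldl (fun s k => if pvT rd colour k then PySem.Set.add s k else s)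
            (PySem.Set.ofList colour)).length ≠ colour.length
      then findouter
        ((rd.map Prod.fst).foldl (fun s k => if pvT rd colour k then PySem.Set.add s k else s)
          (PySem.Set.ofList colour)) rd
      else (rd.map Prod.fst).foldl (fun s k => if pvT rd colour k then PySem.Set.add s k else s)
        (PySem.Set.ofList colour) := by
  conv_lhs => rw [findouter]
  simp only [findouterScan, pv_A_collapse, pvT, pvTrig, dite_eq_ite]
  rfl

-- B's round in canonical form (fst component)
theorem pv_bfold_fst0 (T : String × List String → Bool) (rd : List (String × List String)) :
    ∀ u nl : List String,
      (rd.foldl (fun acc p =>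
          if !acc.1.contains p.1 && T p then (acc.1 ++ [p.1], acc.2 ++ [p.1]) else acc) (u, nl)).1
        = rd.foldl (fun s p => if T p then PySem.Set.add s p.1 else s) u := by
  induction rd with
  | nil => intro u nl; rfl
  | cons p t ih =>
    intro u nl
    by_cases hT : T p = true
    · by_cases hm : u.contains p.1 = true
      · have hmm : p.1 ∈ u := by simpa using hm
        rw [List.foldl_cons, if_neg (by simp [hT, hmm]), List.foldl_cons, if_pos hT,
          PySem.Set.add_of_mem hmm]
        exact ih u nl
      · have hmm : p.1 ∉ u := by simpa using hm
        rw [List.foldl_cons, if_pos (by simp [hT, hmm]), List.foldl_cons, if_pos hT,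
          PySem.Set.add_of_not_mem hmm]
        exact ih (u ++ [p.1]) (nl ++ [p.1])
    · rw [List.foldl_cons, if_neg (by simp [hT]), List.foldl_cons, if_neg (by simp [hT])]
      exact ih u nl

theorem pv_bfold_fst (rd : List (String × List String)) (fr : List String)
    (hk : (rd.map Prod.fst).Nodup) (u nl : List String) :
    (rd.foldl (fun acc p =>
        if !acc.1.contains p.1 &&
            p.2.any (fun inner => fr.any (fun c => PySem.Str.isIn c inner))
        then (acc.1 ++ [p.1], acc.2 ++ [p.1]) else acc) (u, nl)).1
      = (rd.map Prod.fst).foldl (fun s k => if pvT rd fr k then PySem.Set.add s k else s) u := by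
  rw [pv_bfold_fst0, List.foldl_map]
  apply PySem.List.foldl_congr_mem
  intro acc p hp
  have hget : PySem.Dict.getD ⟨rd⟩ p.1 [] = p.2 := by
    apply PySem.Dict.getD_of_mem_items
    · show (p.1, p.2) ∈ rd
      simpa using hp
    · simpa [PySem.Dict.keys, PySem.Dict.items] using hk
  simp only [pvT, pvTrig, hget]

-- the main equivalence: A's full-rescan recursion equals B's frontier loop
theorem pv_main (rd : List (String × List String)) (hk : (rd.map Prod.fst).Nodup) :
    ∀ (n : Nat) (out fr : List String),
      (rd.map Prod.fst).countP (fun k => !out.contains k) ≤ n →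
      out.Nodup →
      (∃ old, out = old ++ fr ∧ ∀ k ∈ rd.map Prod.fst, pvT rd old k = true → k ∈ out) →
      findouter out rd = findouterLoop rd out fr ∧ (findouterLoop rd out fr).Nodup := by
  intro n
  induction n using Nat.strong_induction_on with
  | _ n ihn =>
  intro out fr hle hnd hinv
  obtain ⟨old, hout, hcov⟩ := hinv
  -- A's round over the whole set equals the round over the frontier only
  have hfold : (rd.map Prod.fst).foldl
        (fun s k => if pvT rd out k then PySem.Set.add s k else s) out
      = (rd.map Prod.fst).foldl
        (fun s k => if pvT rd fr k then PySem.Set.add s k else s) out := by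
    apply pv_sfold_frontier
    · intro k hT
      rw [hout, pv_T_append, hT, Bool.or_true]
    · intro k hkmem hT
      rw [hout, pv_T_append] at hT
      rcases Bool.or_eq_true_iff.mp hT with hT | hT
      · exact Or.inr (hcov k hkmem hT)
      · exact Or.inl hT
    · exact fun x hx => hx
  obtain ⟨e, he, hnde, hfresh⟩ :=
    pv_sfold_decomp (pvT rd fr) (rd.map Prod.fst) out hnd
  -- unfold one A step
  have hA : findouter out rd =
      if (out ++ e).length ≠ out.length then findouter (out ++ e) rd else out ++ e := by
    rw [pv_A_eq, PySem.Set.ofList_eq_self_of_nodup out hnd, hfold, he]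
  -- unfold one B step
  have hB : ¬ fr.isEmpty = true → findouterLoop rd out fr = findouterLoop rd (out ++ e) e := by
    intro hfr
    conv_lhs => rw [findouterLoop]
    rw [dif_neg hfr]
    obtain ⟨e', hstep, _⟩ := pv_round_spec rd out fr
    have hfst : (findouterRound rd out fr).1
        = (rd.map Prod.fst).foldl (fun s k => if pvT rd fr k then PySem.Set.add s k else s) out :=
      pv_bfold_fst rd fr hk out []
    rw [hstep] at hfst
    simp only [hstep]
    have hfst2 : out ++ e' = _ := hfst
    have he' : e' = e := by
      apply List.append_cancel_left (as := out)
      rw [hfst2, he]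
    rw [he']
  by_cases hfr : fr.isEmpty = true
  · -- empty frontier: the loop stops; A's round adds nothing since old = out covers everything
    have hfr' : fr = [] := List.isEmpty_iff.mp hfr
    have he0 : e = [] := by
      rcases e with _ | ⟨x, e'⟩
      · rfl
      · obtain ⟨_, _, hx3⟩ := hfresh x List.mem_cons_self
        rw [hfr', pv_T_nil] at hx3
        cases hx3
    have hstop : findouterLoop rd out fr = out := by
      conv_lhs => rw [findouterLoop]
      rw [dif_pos hfr]
    subst he0
    simp only [List.append_nil] at hA
    rw [hstop, hA]
    simp [hnd]
  · rw [hB hfr]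
    rcases e with _ | ⟨x, e'⟩
    · -- nothing new: both stop with out
      simp only [List.append_nil] at hA ⊢
      have hstop : findouterLoop rd out [] = out := by
        conv_lhs => rw [findouterLoop]
        simp
      rw [hstop, hA]
      simp [hnd]
    · -- new keys found: recurse/iterate with the grown set and the new frontier
      have hx := hfresh x List.mem_cons_self
      have hmono : ∀ y ∈ rd.map Prod.fst,
          (!(out ++ x :: e').contains y) = true → (!out.contains y) = true := by
        intro y _ hy
        simp only [Bool.not_eq_true', List.contains_eq_mem, decide_eq_false_iff_not,
          List.mem_append] at hy ⊢
        exact fun hc => hy (Or.inl hc)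
      have hlt : (rd.map Prod.fst).countP (fun k => !(out ++ x :: e').contains k)
          < (rd.map Prod.fst).countP (fun k => !out.contains k) :=
        pv_countP_lt _ _ _ hmono x hx.1 (by simp) (by simpa using hx.2.1)
      have hinv' : ∀ k ∈ rd.map Prod.fst, pvT rd out k = true → k ∈ out ++ x :: e' := by
        -- every key triggered by the previous set is in the grown set
        intro k hkmem hT
        have hmem : k ∈ (rd.map Prod.fst).foldl
            (fun s k => if pvT rd out k then PySem.Set.add s k else s) out :=
          (pv_sfold_mem _ _ _ _).mpr (Or.inr ⟨hkmem, hT⟩)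
        rw [hfold, he] at hmem
        exact hmem
      have hrec := ihn ((rd.map Prod.fst).countP (fun k => !(out ++ x :: e').contains k))
        (lt_of_lt_of_le hlt hle) (out ++ x :: e') (x :: e') le_rfl hnde
        ⟨out, rfl, hinv'⟩
      constructor
      · rw [hA, if_pos (by simp)]
        exact hrec.1
      · exact hrec.2

-- ===== VERDICT (by name: the statement is the Claim_ definition above) =====
theorem findouter_spec : Claim_equal_findouter := by
  intro colour rd _ hpre
  obtain ⟨hc, hk⟩ := hpre
  unfold Spec_findouter findouter_alt
  have hded : colour.foldl (fun out c => if out.contains c then out else out ++ [c])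
      ([] : List String) = PySem.Set.ofList colour := by
    rw [PySem.Set.ofList_eq_foldl]
    rfl
  have hmain := pv_main rd hk ((rd.map Prod.fst).countP (fun k => !colour.contains k))
    colour colour le_rfl hc
    ⟨[], by simp, by intro k _ hT; rw [pv_T_nil] at hT; cases hT⟩
  simp only [hded, PySem.Set.ofList_eq_self_of_nodup colour hc]
  rw [PySem.Set.ofList_eq_self_of_nodup _ hmain.2]
  exact hmain.1
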